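-- pv_equiv track=rewrite | github.com/bicycleman15/practice | rnn/non_linear_linear_rnn_s3.py | _build_sn_cayley
-- ===== SOURCE A (Python) =====
-- from itertools import permutations
--
-- def _build_sn_cayley(n: int):
--     """Enumerate S_n and build its multiplication table.
--
--     Elements are tuples representing permutations of (0, ..., n-1).
--     Composition convention: (a . b)[i] = a[b[i]], i.e. b applied first, then a.
--     With this convention, if we track `running` left-to-right and do
--     `running = running . g_t` at each step, `running` equals the product
--     g_1 . g_2 . ... . g_t.
--     """
--     perms = sorted(permutations(range(n)))  # canonical index order
--     size = len(perms)
--     idx = {p: i for i, p in enumerate(perms)}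
--     table = [[0] * size for _ in range(size)]
--     for i, a in enumerate(perms):
--         for j, b in enumerate(perms):
--             c = tuple(a[b[k]] for k in range(n))
--             table[i][j] = idx[c]
--     return perms, table
-- ===== SOURCE B (Python) =====
-- def _perms_lex(elems):
--     """All permutations of the distinct sorted tuple `elems`, in lexicographic order."""
--     if not elems:
--         return [()]
--     return [(x,) + rest
--             for x in elems
--             for rest in _perms_lex(tuple(y for y in elems if y != x))]
--
--
-- def _build_sn_cayley(n: int):
--     """Enumerate S_n and build its multiplication table.
--
--     Same convention as before: (a . b)[i] = a[b[i]] (b applied first).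
--     Instead of a dict from permutation to index, the index of the composed
--     permutation is computed arithmetically as its lexicographic rank in the
--     factorial number system.
--     """
--     perms = _perms_lex(tuple(range(n)))
--
--     def rank(c):
--         r = 0
--         avail = list(range(n))
--         for v in c:
--             k = avail.index(v)
--             r = r * len(avail) + k
--             avail = [y for y in avail if y != v]
--         return r
--
--     table = [[rank(tuple(a[j] for j in b)) for b in perms] for a in perms]
--     return perms, table
-- ===== Notes on version B (the rewrite author's own statement) =====
-- stated objective: alternative
-- what changed: Permutations are generated directly in lexicographic order by a recursive pick-smallest-first enumeration (no itertools+sorted), and the table entry is the composed permutation's lexicographic rank computed arithmetically in the factorial number system instead of a lookup in a precomputed dict.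
import Mathlib
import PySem

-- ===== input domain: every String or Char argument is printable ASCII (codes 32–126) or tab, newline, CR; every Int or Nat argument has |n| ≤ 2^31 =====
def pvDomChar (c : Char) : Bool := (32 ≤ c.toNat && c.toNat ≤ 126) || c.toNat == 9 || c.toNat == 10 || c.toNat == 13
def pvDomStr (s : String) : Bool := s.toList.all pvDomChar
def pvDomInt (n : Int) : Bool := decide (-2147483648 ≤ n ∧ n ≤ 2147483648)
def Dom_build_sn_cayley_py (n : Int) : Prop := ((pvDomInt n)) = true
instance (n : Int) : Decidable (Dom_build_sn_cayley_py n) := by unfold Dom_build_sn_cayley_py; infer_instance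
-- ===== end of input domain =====

-- B replaces itertools+sorted+dict by a direct lexicographic enumeration and an
-- arithmetic factorial-number-system rank (objective: alternative algorithm, same results).

-- ===== PORT A =====
-- perms = sorted(permutations(range(n))); itertools default r = len(xs).
-- table is preallocated and then every entry table[i][j] is assigned exactly once,
-- in row-major order; ported as the nested map that produces each entry in that order.
-- idx[c] cannot raise KeyError (c is always a permutation of range(n), hence a key): ported as get? with getD 0.
-- a[b[k]] / b[k] cannot raise IndexError (entries of a permutation index into it): pyGet? with getD 0.
def build_sn_cayley_py (n : Int) : List (List Int) × List (List Int) :=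
  let perms := PySem.List.sorted
      (PySem.List.permutations (PySem.List.pyRange 0 n) (PySem.List.pyRange 0 n).length)
      (fun p => p) false
  let idx := (PySem.List.enumerate perms).foldl
      (fun d ip => d.insert ip.2 ip.1) (PySem.Dict.mk [])
  let table := perms.map (fun a => perms.map (fun b =>
      let c := (PySem.List.pyRange 0 n).map
          (fun k => (PySem.List.pyGet? a ((PySem.List.pyGet? b k).getD 0)).getD 0)
      (idx.get? c).getD 0))
  (perms, table)

-- ===== PORT B =====
-- port of Source B's _perms_lex; the recursion is fueled by the length of the initial
-- list (the comprehension removes exactly one element per level on the distinct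
-- lists the entry point produces, so the fuel matches the Python base case exactly)
def permsLexF : Nat → List Int → List (List Int)
  | 0, _ => [[]]
  | r + 1, l => l.flatMap (fun x =>
      (permsLexF r (l.filter (fun y => y != x))).map (fun rest => x :: rest))

-- port of Source B's rank: avail.index(v) cannot raise ValueError (v is always available): index? with getD 0
def rankB (n : Int) (c : List Int) : Int :=
  (c.foldl
    (fun st v =>
      (st.1 * (st.2.length : Int) + ((PySem.List.index? st.2 v).getD 0 : Nat),
       st.2.filter (fun y => y != v)))
    ((0 : Int), PySem.List.pyRange 0 n)).1

def build_sn_cayley_py_alt (n : Int) : List (List Int) × List (List Int) :=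
  let perms := permsLexF (PySem.List.pyRange 0 n).length (PySem.List.pyRange 0 n)
  let table := perms.map (fun a => perms.map (fun b =>
      rankB n (b.map (fun j => (PySem.List.pyGet? a j).getD 0))))
  (perms, table)

-- ===== PRECONDITION & SPEC =====
def Spec_build_sn_cayley_py (n : Int) (out : List (List Int) × List (List Int)) : Prop := out = build_sn_cayley_py_alt n
instance (n : Int) (out : List (List Int) × List (List Int)) : Decidable (Spec_build_sn_cayley_py n out) := by unfold Spec_build_sn_cayley_py; infer_instance

-- ===== CLAIM (what is proved, stated in full; the proofs are below) =====
def Claim_equal_build_sn_cayley_py : Prop := ∀ (n : Int), Dom_build_sn_cayley_py n → Spec_build_sn_cayley_py n (build_sn_cayley_py n)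

-- ===== LEMMAS AND PROOFS =====

-- the lexicographic rank of permutation c of the (strictly sorted) list l
def rankNat : List Int → List Int → Nat
  | [], _ => 0
  | v :: rest, l =>
      l.idxOf v * (l.length - 1).factorial + rankNat rest (l.filter (fun y => y != v))

theorem filter_length_of_nodup (l : List Int) (x : Int) (hnd : l.Nodup) (hx : x ∈ l) :
    (l.filter (fun y => y != x)).length = l.length - 1 := by
  rw [← List.Nodup.erase_eq_filter hnd x, List.length_erase_of_mem hx]

theorem flatMap_range_eraseIdx {β : Type} :
    ∀ (l : List Int), l.Nodup → ∀ (f : Int → List Int → List β),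
    (List.range l.length).flatMap (fun i => match l[i]? with
        | none => [] | some x => f x (l.eraseIdx i))
    = l.flatMap (fun x => f x (l.filter (fun y => y != x))) := by
  intro l
  induction l with
  | nil => intro _ f; simp
  | cons a l ih =>
    intro hnd f
    simp only [List.nodup_cons] at hnd
    rw [List.length_cons, List.range_succ_eq_map, List.flatMap_cons, List.flatMap_map]
    have h1 : (fun i => match (a :: l)[Nat.succ i]? with
        | none => ([] : List β) | some x => f x ((a :: l).eraseIdx (Nat.succ i)))
        = (fun i => match l[i]? with
        | none => ([] : List β) | some x => (fun x m => f x (a :: m)) x (l.eraseIdx i)) := by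
      funext i; simp
    rw [h1, ih hnd.2 (fun x m => f x (a :: m))]
    rw [List.flatMap_cons]
    have h2 : (a :: l).filter (fun y => y != a) = l := by
      simp
      exact fun x hx hxa => hnd.1 (hxa ▸ hx)
    have h3 : l.flatMap (fun x => (fun x m => f x (a :: m)) x (l.filter (fun y => y != x)))
        = l.flatMap (fun x => f x ((a :: l).filter (fun y => y != x))) := by
      apply List.flatMap_congr
      intro x hx
      have hax : a ≠ x := fun h => hnd.1 (h ▸ hx)
      simp [List.filter_cons, hax]
    rw [h3, h2]
    simp

theorem perm_eq_lexF : ∀ (r : Nat) (l : List Int), l.Nodup →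
    PySem.List.permutations l r = permsLexF r l := by
  intro r
  induction r with
  | zero => intro l _; rfl
  | succ r ih =>
    intro l hnd
    have hunf : PySem.List.permutations l (r+1)
        = (List.range l.length).flatMap (fun i => match l[i]? with
            | none => []
            | some x => (PySem.List.permutations (l.eraseIdx i) r).map (fun rest => x :: rest)) := by
      rw [PySem.List.permutations]
      refine congrArg (fun f => List.flatMap f (List.range l.length)) ?_
      funext i; cases h : l[i]? <;> simp [h]
    rw [hunf, permsLexF,
      flatMap_range_eraseIdx l hnd (fun x m => (PySem.List.permutations m r).map (fun rest => x :: rest))]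
    apply List.flatMap_congr
    intro x hx
    rw [ih _ (hnd.filter _)]

theorem length_lexF : ∀ (r : Nat) (l : List Int), l.Nodup → r = l.length →
    (permsLexF r l).length = r.factorial := by
  intro r
  induction r with
  | zero => intro l _ _; rfl
  | succ r ih =>
    intro l hnd hr
    rw [permsLexF, List.length_flatMap]
    have h1 : ∀ x ∈ l, ((permsLexF r (l.filter (fun y => y != x))).map (fun rest => x :: rest)).length = r.factorial := by
      intro x hx
      rw [List.length_map]
      exact ih _ (hnd.filter _) (by rw [filter_length_of_nodup l x hnd hx]; omega)
    rw [List.map_congr_left h1, List.map_const', List.sum_replicate, smul_eq_mul, ← hr,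
      Nat.factorial_succ]

theorem mem_lexF : ∀ (r : Nat) (l c : List Int), l.Nodup → r = l.length → c.Perm l →
    c ∈ permsLexF r l := by
  intro r
  induction r with
  | zero =>
    intro l c _ hr hp
    have : c = [] := by
      have := hp.length_eq; simp [← hr] at this; exact this
    simp [permsLexF, this]
  | succ r ih =>
    intro l c hnd hr hp
    cases c with
    | nil => have := hp.length_eq; simp [← hr] at this
    | cons v rest =>
      rw [List.cons_perm_iff_perm_erase] at hp
      obtain ⟨hv, hrest⟩ := hp
      rw [List.Nodup.erase_eq_filter hnd] at hrest
      rw [permsLexF, List.mem_flatMap]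
      refine ⟨v, hv, List.mem_map.mpr ⟨rest, ?_, rfl⟩⟩
      exact ih _ _ (hnd.filter _) (by rw [filter_length_of_nodup l v hnd hv]; omega) hrest

theorem mem_lexF_perm : ∀ (r : Nat) (l c : List Int), l.Nodup → r = l.length →
    c ∈ permsLexF r l → c.Perm l := by
  intro r
  induction r with
  | zero =>
    intro l c _ hr hm
    have hl : l = [] := List.eq_nil_of_length_eq_zero (by omega)
    simp [permsLexF] at hm
    simp [hm, hl]
  | succ r ih =>
    intro l c hnd hr hm
    rw [permsLexF, List.mem_flatMap] at hm
    obtain ⟨x, hx, hm⟩ := hm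
    obtain ⟨rest, hrest, rfl⟩ := List.mem_map.mp hm
    rw [List.cons_perm_iff_perm_erase]
    refine ⟨hx, ?_⟩
    rw [List.Nodup.erase_eq_filter hnd]
    exact ih _ _ (hnd.filter _) (by rw [filter_length_of_nodup l x hnd hx]; omega) hrest

theorem lexF_pairwise_lt : ∀ (r : Nat) (l : List Int), l.Pairwise (· < ·) →
    (permsLexF r l).Pairwise (· < ·) := by
  intro r
  induction r with
  | zero => intro l _; simp [permsLexF]
  | succ r ih =>
    intro l hpw
    rw [permsLexF, List.flatMap_def, List.pairwise_flatten]
    constructor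
    · intro s hs
      obtain ⟨x, hx, rfl⟩ := List.mem_map.mp hs
      rw [List.pairwise_map]
      exact (ih _ (hpw.filter _)).imp (fun h => by
        rw [List.cons_lt_cons_iff]; right; exact ⟨rfl, h⟩)
    · rw [List.pairwise_map]
      refine hpw.imp ?_
      intro x y hxy a ha b hb
      obtain ⟨p, hp, rfl⟩ := List.mem_map.mp ha
      obtain ⟨q, hq, rfl⟩ := List.mem_map.mp hb
      rw [List.cons_lt_cons_iff]; left; exact hxy

theorem idxOf?_mem {α : Type} [BEq α] [LawfulBEq α] :
    ∀ (l : List α) (v : α), v ∈ l → List.idxOf? v l = some (l.idxOf v) := by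
  intro l
  induction l with
  | nil => intro v hv; simp at hv
  | cons a l ih =>
    intro v hv
    by_cases h : a = v
    · subst h; simp [List.idxOf?, List.findIdx?_cons, List.idxOf_cons]
    · have hv' : v ∈ l := by
        rcases List.mem_cons.mp hv with h' | h'
        · exact absurd h'.symm h
        · exact h'
      have hbeq : (a == v) = false := beq_eq_false_iff_ne.mpr h
      simp [List.idxOf?, List.findIdx?_cons, hbeq, List.idxOf_cons]
      have := ih v hv'
      simp [List.idxOf?] at this
      simp [this]

theorem idxOf?_append_left {c : List Int} {A B : List (List Int)} {i : Nat}
    (h : List.idxOf? c A = some i) : List.idxOf? c (A ++ B) = some i := by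
  induction A generalizing i with
  | nil => simp [List.idxOf?] at h
  | cons a A ih =>
    simp only [List.cons_append, List.idxOf?, List.findIdx?_cons] at h ⊢
    by_cases hac : (a == c) = true
    · simp [hac] at h ⊢; omega
    · simp only [hac, if_false] at h ⊢
      obtain ⟨j, hj, rfl⟩ := Option.map_eq_some_iff.mp h
      rw [show List.findIdx? (fun x => x == c) (A ++ B) = some j from ih hj]
      rfl

theorem idxOf?_append_of_not_mem {c : List Int} {A B : List (List Int)}
    (h : c ∉ A) : List.idxOf? c (A ++ B) = (List.idxOf? c B).map (· + A.length) := by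
  induction A with
  | nil => simp
  | cons a A ih =>
    have hac : (a == c) = false := beq_eq_false_iff_ne.mpr (fun he => h (he ▸ List.mem_cons_self))
    have h' : c ∉ A := fun hm => h (List.mem_cons_of_mem _ hm)
    simp only [List.cons_append, List.idxOf?, List.findIdx?_cons, hac, if_false] at *
    rw [ih h']
    cases List.idxOf? c B <;> simp [List.idxOf?] <;> omega

theorem idxOf?_map_cons (L : List (List Int)) (v : Int) (rest : List Int) :
    List.idxOf? (v :: rest) (L.map (fun p => v :: p)) = List.idxOf? rest L := by
  induction L with
  | nil => rfl
  | cons a L ih =>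
    simp only [List.map_cons, List.idxOf?, List.findIdx?_cons]
    have : ((v :: a) == (v :: rest)) = (a == rest) := by
      simp [beq_iff_eq]
    rw [this]
    by_cases h : (a == rest) = true
    · simp [h]
    · simp only [eq_false_of_ne_true h, if_false]
      rw [show List.findIdx? (fun x => x == (v :: rest)) (L.map (fun p => v :: p))
            = List.findIdx? (fun x => x == rest) L from ih]

theorem idx_lexF : ∀ (r : Nat) (l c : List Int), l.Nodup → r = l.length → c.Perm l →
    List.idxOf? c (permsLexF r l) = some (rankNat c l) := by
  intro r
  induction r with
  | zero =>
    intro l c _ hr hp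
    have hc : c = [] := by have := hp.length_eq; simp [← hr] at this; exact this
    subst hc
    simp [permsLexF, rankNat, List.idxOf?, List.findIdx?_cons]
  | succ r ih =>
    intro l c hnd hr hp
    cases c with
    | nil => have := hp.length_eq; simp [← hr] at this
    | cons v rest =>
      obtain ⟨hv, hrest⟩ := List.cons_perm_iff_perm_erase.mp hp
      obtain ⟨l₁, l₂, rfl⟩ := List.append_of_mem hv
      rw [List.Nodup.erase_eq_filter hnd] at hrest
      have hv1 : v ∉ l₁ := by
        have h := List.disjoint_of_nodup_append hnd
        exact fun hm => h hm List.mem_cons_self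
      have hfl : ((l₁ ++ v :: l₂).filter (fun y => y != v)).length = r := by
        rw [filter_length_of_nodup _ v hnd hv]; omega
      rw [permsLexF, List.flatMap_append, List.flatMap_cons]
      have hnotmem : (v :: rest) ∉ l₁.flatMap (fun x =>
          (permsLexF r ((l₁ ++ v :: l₂).filter (fun y => y != x))).map (fun rest => x :: rest)) := by
        intro hm
        obtain ⟨x, hx, hmm⟩ := List.mem_flatMap.mp hm
        obtain ⟨p, _, heq⟩ := List.mem_map.mp hmm
        injection heq with h1 h2
        exact hv1 (h1 ▸ hx)
      rw [idxOf?_append_of_not_mem hnotmem]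
      have hin : List.idxOf? (v :: rest)
          ((permsLexF r ((l₁ ++ v :: l₂).filter (fun y => y != v))).map (fun rest => v :: rest))
          = some (rankNat rest ((l₁ ++ v :: l₂).filter (fun y => y != v))) := by
        rw [idxOf?_map_cons]
        exact ih _ _ (hnd.filter _) hfl.symm hrest
      rw [idxOf?_append_left hin]
      have hlen : (l₁.flatMap (fun x =>
          (permsLexF r ((l₁ ++ v :: l₂).filter (fun y => y != x))).map (fun rest => x :: rest))).length
          = l₁.length * r.factorial := by
        rw [List.length_flatMap]
        have h1 : ∀ x ∈ l₁, ((permsLexF r ((l₁ ++ v :: l₂).filter (fun y => y != x))).map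
            (fun rest => x :: rest)).length = r.factorial := by
          intro x hx
          rw [List.length_map]
          exact length_lexF _ _ (hnd.filter _)
            (by rw [filter_length_of_nodup _ x hnd (List.mem_append_left _ hx)]; omega)
        rw [List.map_congr_left h1, List.map_const', List.sum_replicate, smul_eq_mul]
      have hidx : (l₁ ++ v :: l₂).idxOf v = l₁.length := by
        rw [List.idxOf_append, if_neg hv1, List.idxOf_cons_self]
        omega
      show some (rankNat rest _ + _) = _
      rw [hlen, rankNat, hidx]
      have hl1 : (l₁ ++ v :: l₂).length - 1 = r := by
        rw [← hr]; omega
      rw [hl1]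
      rw [Nat.add_comm]

theorem rankB_fold : ∀ (c l : List Int) (r0 : Int), l.Nodup → c.Perm l →
    (c.foldl
      (fun st v =>
        (st.1 * (st.2.length : Int) + ((PySem.List.index? st.2 v).getD 0 : Nat),
         st.2.filter (fun y => y != v)))
      (r0, l)).1 = r0 * (l.length.factorial : Int) + rankNat c l := by
  intro c
  induction c with
  | nil =>
    intro l r0 _ hp
    have hl : l = [] := hp.symm.eq_nil
    subst hl
    simp [rankNat, Nat.factorial]
  | cons v rest ih =>
    intro l r0 hnd hp
    obtain ⟨hv, hrest⟩ := List.cons_perm_iff_perm_erase.mp hp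
    rw [List.Nodup.erase_eq_filter hnd] at hrest
    have hk : PySem.List.index? l v = some (l.idxOf v) := by
      rw [PySem.List.index?_eq_idxOf?]; exact idxOf?_mem l v hv
    have hm : l.length = (l.length - 1) + 1 :=
      (Nat.succ_pred_eq_of_pos (List.length_pos_of_mem hv)).symm
    have hflen : (l.filter (fun y => y != v)).length = l.length - 1 :=
      filter_length_of_nodup l v hnd hv
    rw [List.foldl_cons]
    rw [ih (l.filter (fun y => y != v)) _ (hnd.filter _) hrest]
    rw [rankNat, hk, hflen]
    rw [hm, Nat.factorial_succ]
    simp only [Option.getD_some]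
    push_cast
    ring

theorem dict_foldl_not_mem : ∀ (ps : List (Int × List Int)) (d : PySem.Dict (List Int) Int)
    (k : List Int), (∀ p ∈ ps, p.2 ≠ k) →
    (ps.foldl (fun d ip => d.insert ip.2 ip.1) d).get? k = d.get? k := by
  intro ps
  induction ps with
  | nil => intro d k _; rfl
  | cons p ps ih =>
    intro d k h
    rw [List.foldl_cons, ih _ _ (fun q hq => h q (List.mem_cons_of_mem _ hq))]
    exact PySem.Dict.get?_insert_of_ne d p.1 (h p List.mem_cons_self).symm

theorem dict_get?_enumerate : ∀ (perms : List (List Int)) (s : Int)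
    (d : PySem.Dict (List Int) Int) (k : List Int), perms.Nodup → k ∈ perms →
    ((PySem.List.enumerate perms s).foldl (fun d ip => d.insert ip.2 ip.1) d).get? k
      = some (s + (perms.idxOf k : Int)) := by
  intro perms
  induction perms with
  | nil => intro s d k _ hk; simp at hk
  | cons x xs ih =>
    intro s d k hnd hk
    simp only [List.nodup_cons] at hnd
    rw [PySem.List.enumerate_cons, List.foldl_cons]
    by_cases hxk : x = k
    · subst hxk
      have hkeys : ∀ p ∈ PySem.List.enumerate xs (s + 1), p.2 ≠ x := by
        intro p hp he
        obtain ⟨j, hj, rfl⟩ := (PySem.List.mem_enumerate_iff xs (s + 1) p).mp hp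
        exact hnd.1 (he ▸ List.getElem_mem hj)
      rw [dict_foldl_not_mem _ _ _ hkeys, PySem.Dict.get?_insert_self,
        List.idxOf_cons_self]
      norm_num
    · have hk' : k ∈ xs := by
        rcases List.mem_cons.mp hk with h | h
        · exact absurd h.symm hxk
        · exact h
      rw [ih (s + 1) _ _ hnd.2 hk']
      have : (x :: xs).idxOf k = xs.idxOf k + 1 := by
        simp [List.idxOf_cons, beq_eq_false_iff_ne.mpr hxk]
      rw [this]
      push_cast
      ring

theorem map_index_self (n : Int) (a : List Int) (ha : a.Perm (PySem.List.pyRange 0 n)) :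
    (PySem.List.pyRange 0 n).map (fun j => (PySem.List.pyGet? a j).getD 0) = a := by
  have hlen : a.length = (PySem.List.pyRange 0 n).length := ha.length_eq
  apply List.ext_getElem
  · simp [hlen]
  · intro i h1 h2
    rw [List.getElem_map, PySem.List.getElem_pyRange_one]
    simp only [zero_add, PySem.List.pyGet?_natCast]
    rw [List.getElem?_eq_getElem h2]
    rfl

theorem compose_eq (n : Int) (a b : List Int) (hb : b.Perm (PySem.List.pyRange 0 n)) :
    (PySem.List.pyRange 0 n).map
        (fun k => (PySem.List.pyGet? a ((PySem.List.pyGet? b k).getD 0)).getD 0)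
      = b.map (fun j => (PySem.List.pyGet? a j).getD 0) := by
  have hlen : b.length = (PySem.List.pyRange 0 n).length := hb.length_eq
  apply List.ext_getElem
  · simp [hlen]
  · intro i h1 h2
    rw [List.getElem_map, List.getElem_map, PySem.List.getElem_pyRange_one]
    have hib : i < b.length := by simp at h2; omega
    simp only [zero_add, PySem.List.pyGet?_natCast]
    rw [List.getElem?_eq_getElem hib]
    rfl

-- ===== VERDICT (by name: the statement is the Claim_ definition above) =====
theorem build_sn_cayley_py_spec : Claim_equal_build_sn_cayley_py := by
  unfold Claim_equal_build_sn_cayley_py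
  intro n _
  unfold Spec_build_sn_cayley_py build_sn_cayley_py build_sn_cayley_py_alt
  have hndR : (PySem.List.pyRange 0 n).Nodup := PySem.List.nodup_pyRange_one 0 n
  have hpwR : (PySem.List.pyRange 0 n).Pairwise (· < ·) := PySem.List.pairwise_lt_pyRange_one 0 n
  have hpwP : (permsLexF (PySem.List.pyRange 0 n).length (PySem.List.pyRange 0 n)).Pairwise (· < ·) :=
    lexF_pairwise_lt _ _ hpwR
  have hndP : (permsLexF (PySem.List.pyRange 0 n).length (PySem.List.pyRange 0 n)).Nodup :=
    hpwP.imp (fun h => ne_of_lt h)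
  have hsort : PySem.List.sorted
      (PySem.List.permutations (PySem.List.pyRange 0 n) (PySem.List.pyRange 0 n).length)
      (fun p => p) false = permsLexF (PySem.List.pyRange 0 n).length (PySem.List.pyRange 0 n) := by
    rw [perm_eq_lexF _ _ hndR]
    have hinst : (fun (a b : List Int) => a.decidableLT b)
        = (LinearOrder.toDecidableLT : DecidableLT (List Int)) := by
      funext a b; exact Subsingleton.elim _ _
    rw [hinst]
    exact PySem.List.sorted_eq_self_of_pairwise _ _ (hpwP.imp le_of_lt)
  dsimp only
  rw [hsort]
  refine Prod.ext rfl ?_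
  apply List.map_congr_left
  intro a ha
  apply List.map_congr_left
  intro b hb
  have haP : a.Perm (PySem.List.pyRange 0 n) := mem_lexF_perm _ _ _ hndR rfl ha
  have hbP : b.Perm (PySem.List.pyRange 0 n) := mem_lexF_perm _ _ _ hndR rfl hb
  rw [compose_eq n a b hbP]
  have hcP : (b.map (fun j => (PySem.List.pyGet? a j).getD 0)).Perm (PySem.List.pyRange 0 n) := by
    have h1 := hbP.map (fun j => (PySem.List.pyGet? a j).getD 0)
    rw [map_index_self n a haP] at h1
    exact h1.trans haP
  have hmem : (b.map (fun j => (PySem.List.pyGet? a j).getD 0))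
      ∈ permsLexF (PySem.List.pyRange 0 n).length (PySem.List.pyRange 0 n) :=
    mem_lexF _ _ _ hndR rfl hcP
  rw [dict_get?_enumerate _ 0 _ _ hndP hmem]
  have hidx := idx_lexF (PySem.List.pyRange 0 n).length (PySem.List.pyRange 0 n) _ hndR rfl hcP
  have hIdxEq : (permsLexF (PySem.List.pyRange 0 n).length (PySem.List.pyRange 0 n)).idxOf
      (b.map (fun j => (PySem.List.pyGet? a j).getD 0))
      = rankNat (b.map (fun j => (PySem.List.pyGet? a j).getD 0)) (PySem.List.pyRange 0 n) :=
    Option.some.inj ((idxOf?_mem _ _ hmem).symm.trans hidx)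
  rw [rankB, rankB_fold _ _ 0 hndR hcP]
  rw [hIdxEq]
  simp
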